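-- pv_equiv track=rewrite | github.com/aurora-dot/python-profiling-demo | demo/time.py | compare_user_attributes
-- ===== SOURCE A (Python) =====
-- def compare_user_attributes(user1: int, user2: int, reference: int) -> bool:
--     def is_prime_expensive(n: int) -> bool:
--         if n < 2:
--             return False
--         for i in range(2, min(n, 1000)):
--             if n % i == 0:
--                 return False
--         return True
--
--     check1 = is_prime_expensive(user1 * reference % 10000)
--     check2 = is_prime_expensive(user2 * reference % 10000)
--
--     result = (user1 * reference) % 7 == (user2 * reference) % 7
--     return result and (check1 or check2)
-- ===== SOURCE B (Python) =====
-- def _is_prime(n: int) -> bool: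
--     if n < 2:
--         return False
--     if n % 2 == 0:
--         return n == 2
--     d = 3
--     while d * d <= n:
--         if n % d == 0:
--             return False
--         d += 2
--     return True
--
--
-- def compare_user_attributes(user1: int, user2: int, reference: int) -> bool:
--     a = user1 * reference
--     b = user2 * reference
--     if a % 7 != b % 7:
--         return False
--     return _is_prime(a % 10000) or _is_prime(b % 10000)
-- ===== Notes on version B (the rewrite author's own statement) =====
-- stated objective: faster
-- what changed: B replaces the full scan over range(2, min(n,1000)) by odd-only trial division bounded by d*d <= n (after an explicit even case), and restructures the outer body as an early return on the mod-7 mismatch instead of computing both primality checks unconditionally; exact because is_prime arguments always lie in [0,9999].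
import Mathlib
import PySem

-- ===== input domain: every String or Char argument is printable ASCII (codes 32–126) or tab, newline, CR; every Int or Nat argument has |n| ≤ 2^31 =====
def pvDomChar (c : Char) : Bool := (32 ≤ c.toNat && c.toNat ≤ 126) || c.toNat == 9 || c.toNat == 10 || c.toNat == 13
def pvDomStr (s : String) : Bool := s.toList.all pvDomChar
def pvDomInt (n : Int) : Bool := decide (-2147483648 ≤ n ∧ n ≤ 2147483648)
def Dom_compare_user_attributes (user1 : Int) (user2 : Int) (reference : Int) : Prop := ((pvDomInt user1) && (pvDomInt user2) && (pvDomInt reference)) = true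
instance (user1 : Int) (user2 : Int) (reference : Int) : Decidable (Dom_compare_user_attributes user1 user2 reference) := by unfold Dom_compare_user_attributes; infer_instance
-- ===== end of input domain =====

-- B replaces the scan of range(2, min(n,1000)) by odd-only trial division up to √n (with an
-- explicit even case) and early-returns on the mod-7 mismatch (objective: faster).

-- ===== PORT A =====
-- A's inner loop: for i in range(2, min(n,1000)): if n % i == 0: return False
def pvLoopA (n : Int) : List Int → Bool
  | [] => true
  | i :: rest => if PySem.Int.mod n i == 0 then false else pvLoopA n rest

def pvIsPrimeA (n : Int) : Bool :=
  if n < 2 then false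
  else pvLoopA n (PySem.List.pyRange 2 (min n 1000) 1)

def compare_user_attributes (user1 : Int) (user2 : Int) (reference : Int) : Bool :=
  let check1 := pvIsPrimeA (PySem.Int.mod (user1 * reference) 10000)
  let check2 := pvIsPrimeA (PySem.Int.mod (user2 * reference) 10000)
  let result := PySem.Int.mod (user1 * reference) 7 == PySem.Int.mod (user2 * reference) 7
  result && (check1 || check2)

-- ===== PORT B =====
-- B's inner loop: d = 3; while d * d <= n: if n % d == 0: return False; d += 2
-- (fuel only makes the recursion structural; pvOddTrial_eq_true shows n.toNat fuel is enough)
def pvOddTrial (n : Int) : Nat → Int → Bool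
  | 0, _ => true
  | fuel + 1, d =>
    if d * d ≤ n then
      (if PySem.Int.mod n d == 0 then false else pvOddTrial n fuel (d + 2))
    else true

def pvIsPrimeB (n : Int) : Bool :=
  if n < 2 then false
  else if PySem.Int.mod n 2 == 0 then n == 2
  else pvOddTrial n n.toNat 3

def compare_user_attributes_alt (user1 : Int) (user2 : Int) (reference : Int) : Bool :=
  let a := user1 * reference
  let b := user2 * reference
  if PySem.Int.mod a 7 != PySem.Int.mod b 7 then false
  else pvIsPrimeB (PySem.Int.mod a 10000) || pvIsPrimeB (PySem.Int.mod b 10000)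

-- ===== PRECONDITION & SPEC =====
def Spec_compare_user_attributes (user1 : Int) (user2 : Int) (reference : Int) (out : Bool) : Prop := out = compare_user_attributes_alt user1 user2 reference
instance (user1 : Int) (user2 : Int) (reference : Int) (out : Bool) : Decidable (Spec_compare_user_attributes user1 user2 reference out) := by unfold Spec_compare_user_attributes; infer_instance

-- ===== CLAIM (what is proved, stated in full; the proofs are below) =====
def Claim_equal_compare_user_attributes : Prop := ∀ (user1 : Int) (user2 : Int) (reference : Int), Dom_compare_user_attributes user1 user2 reference → Spec_compare_user_attributes user1 user2 reference (compare_user_attributes user1 user2 reference)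

-- ===== LEMMAS AND PROOFS =====

theorem pvLoopA_eq_true (n : Int) (l : List Int) :
    pvLoopA n l = true ↔ ∀ i ∈ l, ¬ (i ∣ n) := by
  induction l with
  | nil => simp [pvLoopA]
  | cons a t ih =>
    simp only [pvLoopA, List.mem_cons]
    by_cases h : PySem.Int.mod n a = 0
    · simp [h, (PySem.Int.mod_eq_zero_iff_dvd n a).mp h]
    · have : ¬ (a ∣ n) := fun hd => h ((PySem.Int.mod_eq_zero_iff_dvd n a).mpr hd)
      simp [h, ih, this]

-- B's odd trial loop from an odd start d checks exactly the odd j with d ≤ j and j*j ≤ n,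
-- provided the fuel bound guarantees the loop condition fails before fuel runs out.
theorem pvOddTrial_eq_true (n : Int) (fuel : Nat) (d : Int) (hd : d % 2 = 1) (hdpos : 0 < d)
    (hfuel : n < (d + 2 * (fuel : Int)) * (d + 2 * (fuel : Int))) :
    pvOddTrial n fuel d = true ↔ ∀ j, d ≤ j → j * j ≤ n → j % 2 = 1 → ¬ (j ∣ n) := by
  induction fuel generalizing d with
  | zero =>
    simp only [pvOddTrial, true_iff]
    push_cast at hfuel
    intro j hij hjj _ _
    nlinarith [mul_le_mul hij hij (le_of_lt hdpos) (by omega : (0:Int) ≤ j)]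
  | succ fuel ih =>
    simp only [pvOddTrial]
    by_cases h : d * d ≤ n
    · rw [if_pos h]
      by_cases hm : PySem.Int.mod n d = 0
      · have hdvd : d ∣ n := (PySem.Int.mod_eq_zero_iff_dvd n d).mp hm
        rw [if_pos (by simpa using hm)]
        constructor
        · intro hfalse; exact absurd hfalse (by simp)
        · intro hall; exact absurd hdvd (hall d le_rfl h hd)
      · rw [if_neg (by simpa using hm),
          ih (d + 2) (by omega) (by omega) (by push_cast at hfuel ⊢; nlinarith)]
        have hnd : ¬ (d ∣ n) := fun hdvd => hm ((PySem.Int.mod_eq_zero_iff_dvd n d).mpr hdvd)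
        constructor
        · intro hall j hij hjj hodd
          rcases eq_or_lt_of_le hij with rfl | hlt
          · exact hnd
          · exact hall j (by omega) hjj hodd
        · intro hall j hij hjj hodd
          exact hall j (by omega) hjj hodd
    · rw [if_neg h]
      rw [Int.not_le] at h
      constructor
      · intro _ j hij hjj _ _
        nlinarith [mul_le_mul hij hij (le_of_lt hdpos) (by omega : (0:Int) ≤ j)]
      · intro _; rfl

-- On [0, 10000) the two primality routines agree: every composite there has an odd
-- divisor j with 3 ≤ j and j*j ≤ n (or is even), and such j lies below min n 1000.
theorem prime_eq (n : Int) (h0 : 0 ≤ n) (h1 : n < 10000) :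
    pvIsPrimeA n = pvIsPrimeB n := by
  unfold pvIsPrimeA pvIsPrimeB
  by_cases h2 : n < 2
  · simp [h2]
  · rw [if_neg h2, if_neg h2]
    have hn2 : 2 ≤ n := by omega
    by_cases heven : n % 2 = 0
    · rw [if_pos (by simp [heven])]
      by_cases hn : n = 2
      · subst hn
        simp [pvLoopA, PySem.List.pyRange]
      · have h4 : 4 ≤ n := by omega
        have h21 : (2:Int) ∣ n := Int.dvd_of_emod_eq_zero heven
        have : pvLoopA n (PySem.List.pyRange 2 (min n 1000) 1) = false := by
          rw [Bool.eq_false_iff]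
          intro htrue
          exact (pvLoopA_eq_true n _).mp htrue 2
            (by rw [PySem.List.mem_pyRange_one]; omega) h21
        simp [this, hn]
    · rw [if_neg (by simp [heven])]
      have hodd : n % 2 = 1 := by omega
      rw [Bool.eq_iff_iff, pvLoopA_eq_true, pvOddTrial_eq_true n n.toNat 3 (by norm_num) (by norm_num)
        (by rw [Int.toNat_of_nonneg h0]; nlinarith)]
      constructor
      · intro hall j h3j hjj hjodd hdvd
        have hj1000 : j < 1000 := by nlinarith
        have hjn : j < n := by nlinarith
        exact hall j (by rw [PySem.List.mem_pyRange_one]; omega) hdvd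
      · intro hall i hi hdvd
        rw [PySem.List.mem_pyRange_one] at hi
        obtain ⟨h2i, hilt⟩ := hi
        have hin : i < n := by omega
        have hiodd : i % 2 = 1 := by
          rcases Int.emod_two_eq_zero_or_one i with he | ho
          · exfalso
            have : (2:Int) ∣ n := dvd_trans (Int.dvd_of_emod_eq_zero he) hdvd
            omega
          · exact ho
        have h3i : 3 ≤ i := by omega
        rcases le_or_gt (i * i) n with hle | hgt
        · exact hall i h3i hle hiodd hdvd
        · obtain ⟨k, hk⟩ := hdvd
          have hkdvd : k ∣ n := ⟨i, by rw [hk]; ring⟩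
          have hkpos : 0 < k := by nlinarith
          have hk2 : 2 ≤ k := by
            by_contra hlt
            have hk1 : k = 1 := by omega
            rw [hk1, mul_one] at hk
            omega
          have hkodd : k % 2 = 1 := by
            rcases Int.emod_two_eq_zero_or_one k with he | ho
            · exfalso
              have : (2:Int) ∣ n := dvd_trans (Int.dvd_of_emod_eq_zero he) hkdvd
              omega
            · exact ho
          have hklt : k < i := by nlinarith
          have hkk : k * k ≤ n := by nlinarith
          exact hall k (by omega) hkk hkodd hkdvd

-- ===== VERDICT (by name: the statement is the Claim_ definition above) =====
theorem compare_user_attributes_spec : Claim_equal_compare_user_attributes := by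
  intro user1 user2 reference _
  unfold Spec_compare_user_attributes compare_user_attributes compare_user_attributes_alt
  have hm : ∀ a : Int, PySem.Int.mod a 10000 = a % 10000 := fun a =>
    PySem.Int.mod_eq_emod_of_pos (by norm_num)
  have h1 := prime_eq (PySem.Int.mod (user1 * reference) 10000)
    (by rw [hm]; exact Int.emod_nonneg _ (by norm_num))
    (by rw [hm]; exact Int.emod_lt_of_pos _ (by norm_num))
  have h2 := prime_eq (PySem.Int.mod (user2 * reference) 10000)
    (by rw [hm]; exact Int.emod_nonneg _ (by norm_num))
    (by rw [hm]; exact Int.emod_lt_of_pos _ (by norm_num))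
  have hm7 : ∀ a : Int, PySem.Int.mod a 7 = a % 7 := fun a =>
    PySem.Int.mod_eq_emod_of_pos (by norm_num)
  simp only [hm] at h1 h2
  simp only [hm, hm7, h1, h2]
  by_cases h7 : (user1 * reference) % 7 = (user2 * reference) % 7 <;> simp [h7]
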